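-- pv_equiv track=rewrite | github.com/asanso/ca | exact_mca_fuzzer.py | mutual_agreement_max_witness
-- ===== SOURCE A (Python) =====
-- from itertools import combinations
-- from typing import List, Tuple, Optional
--
-- def poly_eval(coeffs: List[int], x: int, p: int) -> int:
--     y = 0
--     for c in reversed(coeffs):
--         y = (y * x + c) % p
--     return y
--
-- def eval_poly_vector(coeffs: List[int], xs: List[int], p: int) -> List[int]:
--     return [poly_eval(coeffs, x, p) for x in xs]
--
-- def poly_add(a, b, p):
--     m = max(len(a), len(b))
--     out = [0]*m
--     for i in range(m):
--         if i < len(a): out[i] = (out[i] + a[i]) % p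
--         if i < len(b): out[i] = (out[i] + b[i]) % p
--     return out
--
-- def poly_mul(a, b, p):
--     out = [0]*(len(a)+len(b)-1)
--     for i, ai in enumerate(a):
--         for j, bj in enumerate(b):
--             out[i+j] = (out[i+j] + ai*bj) % p
--     return out
--
-- def poly_scale(a, s, p):
--     return [(ai*s) % p for ai in a]
--
-- def interpolate_lagrange(xs, ys, k, p):
--     coeffs = [0]*k
--     for i in range(k):
--         xi, yi = xs[i] % p, ys[i] % p
--         num = [1]
--         denom = 1
--         for m in range(k):
--             if m == i: continue
--             num = poly_mul(num, [(-xs[m]) % p, 1], p)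
--             denom = (denom * ((xi - xs[m]) % p)) % p
--         inv_denom = pow(denom, p-2, p)
--         li = poly_scale(num, (yi*inv_denom) % p, p)
--         coeffs = poly_add(coeffs, li, p)
--     coeffs = (coeffs + [0]*k)[:k]
--     return coeffs
--
-- def mutual_agreement_max_witness(xs: List[int], fs: List[List[int]], k: int, p: int):
--     """
--     MCA: Find max size of a set S such that for each f_j there exists some RS codeword c_j
--     with f_j(x) = c_j(x) for all x in S. S is common, but c_j may differ.
--     """
--     n = len(xs); ell = len(fs)
--     best = -1; best_S = None
--     for T in combinations(range(n), k):
--         xT = [xs[i] for i in T]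
--         coeffs_list = []
--         for j in range(ell):
--             yT = [fs[j][i] for i in T]
--             coeffs = interpolate_lagrange(xT, yT, k, p)
--             coeffs_list.append(coeffs)
--         match = [True]*n
--         for j in range(ell):
--             cw = eval_poly_vector(coeffs_list[j], xs, p)
--             for i in range(n):
--                 if match[i] and cw[i] != fs[j][i]:
--                     match[i] = False
--         S = [i for i in range(n) if match[i]]
--         if len(S) > best:
--             best = len(S); best_S = S
--             if best == n: break
--     return best, best_S
-- ===== SOURCE B (Python) =====
-- from itertools import combinations
-- from typing import List
--
-- def lagrange_eval(xT: List[int], yT: List[int], x: int, k: int, p: int) -> int: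
--     """Value at x of the Lagrange interpolant through (xT[a], yT[a]), computed
--     directly with a product of per-term modular inverses (no coefficient table)."""
--     v = 0
--     for a in range(k):
--         term = yT[a] % p
--         for m in range(k):
--             if m == a:
--                 continue
--             term = (term * ((x - xT[m]) % p)) % p
--             term = (term * pow((xT[a] - xT[m]) % p, p - 2, p)) % p
--         v = (v + term) % p
--     return v
--
-- def mutual_agreement_max_witness(xs: List[int], fs: List[List[int]], k: int, p: int):
--     n = len(xs); ell = len(fs)
--     best = -1; best_S = None
--     for T in combinations(range(n), k):
--         xT = [xs[i] for i in T]
--         match = [True] * n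
--         for j in range(ell):
--             f = fs[j]
--             yT = [f[i] for i in T]
--             for i in range(n):
--                 if match[i] and lagrange_eval(xT, yT, xs[i], k, p) != f[i]:
--                     match[i] = False
--         S = [i for i in range(n) if match[i]]
--         if len(S) > best:
--             best = len(S); best_S = S
--             if best == n:
--                 break
--     return best, best_S
-- ===== Notes on version B (the rewrite author's own statement) =====
-- stated objective: alternative
-- what changed: Drops poly_mul/poly_add/poly_scale and the coefficient-table Lagrange interpolation plus Horner evaluation entirely: each candidate codeword value is computed by direct Lagrange evaluation at the point, multiplying per-term factors (x-xT[m]) by per-term modular inverses pow((xT[a]-xT[m])%p, p-2, p), and only for positions still marked as matching.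
-- outside the precondition, e.g. on mutual_agreement_max_witness([1, 2], [[1, 0]], 2, -5): A returns (1, [1]), B returns (1, [1]); on mutual_agreement_max_witness([1, 2], [[1, 0]], 3, 7): A returns (-1, None), B returns (-1, None)
import Mathlib
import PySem

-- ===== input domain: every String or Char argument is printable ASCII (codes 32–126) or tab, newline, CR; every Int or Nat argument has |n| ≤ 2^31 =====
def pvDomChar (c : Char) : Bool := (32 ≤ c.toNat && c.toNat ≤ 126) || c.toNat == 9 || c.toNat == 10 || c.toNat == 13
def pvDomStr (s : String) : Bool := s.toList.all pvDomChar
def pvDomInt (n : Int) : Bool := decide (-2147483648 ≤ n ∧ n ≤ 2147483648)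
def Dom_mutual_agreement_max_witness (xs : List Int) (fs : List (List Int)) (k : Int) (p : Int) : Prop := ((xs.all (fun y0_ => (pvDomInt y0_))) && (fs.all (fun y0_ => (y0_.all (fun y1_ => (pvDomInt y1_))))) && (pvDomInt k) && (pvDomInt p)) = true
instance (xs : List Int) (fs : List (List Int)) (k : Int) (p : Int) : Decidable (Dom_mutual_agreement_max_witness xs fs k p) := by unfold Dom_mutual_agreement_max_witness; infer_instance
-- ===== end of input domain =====

-- B replaces the coefficient-building Lagrange interpolation + Horner evaluation by a
-- direct per-point Lagrange evaluation with per-term modular inverses ('alternative').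

-- ===== PORT A =====
def pvPolyEval (coeffs : List Int) (x p : Int) : Int :=
  coeffs.reverse.foldl (fun y c => PySem.Int.mod (y * x + c) p) 0

def pvEvalPolyVector (coeffs xs : List Int) (p : Int) : List Int :=
  xs.map (fun x => pvPolyEval coeffs x p)

def pvPolyAdd (a b : List Int) (p : Int) : List Int :=
  let m : Nat := max a.length b.length
  (PySem.List.pyRange 0 (m : Int) 1).foldl (fun out i =>
    let out := if i < (a.length : Int) then
        PySem.List.pySetD out i (PySem.Int.mod (PySem.List.pyGetD out i 0 + PySem.List.pyGetD a i 0) p)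
      else out
    if i < (b.length : Int) then
      PySem.List.pySetD out i (PySem.Int.mod (PySem.List.pyGetD out i 0 + PySem.List.pyGetD b i 0) p)
    else out) (List.replicate m 0)

def pvPolyMul (a b : List Int) (p : Int) : List Int :=
  (PySem.List.enumerate a 0).foldl (fun out ia =>
    (PySem.List.enumerate b 0).foldl (fun out jb =>
      PySem.List.pySetD out (ia.1 + jb.1)
        (PySem.Int.mod (PySem.List.pyGetD out (ia.1 + jb.1) 0 + ia.2 * jb.2) p)) out)
    (List.replicate (a.length + b.length - 1) 0)

def pvPolyScale (a : List Int) (s p : Int) : List Int :=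
  a.map (fun ai => PySem.Int.mod (ai * s) p)

def pvInterpolateLagrange (xs ys : List Int) (k p : Int) : List Int :=
  let coeffs := (PySem.List.pyRange 0 k 1).foldl (fun coeffs i =>
    let xi := PySem.Int.mod (PySem.List.pyGetD xs i 0) p
    let yi := PySem.Int.mod (PySem.List.pyGetD ys i 0) p
    let nd := (PySem.List.pyRange 0 k 1).foldl (fun (nd : List Int × Int) m =>
      if m = i then nd
      else (pvPolyMul nd.1 [PySem.Int.mod (-(PySem.List.pyGetD xs m 0)) p, 1] p,
            PySem.Int.mod (nd.2 * PySem.Int.mod (xi - PySem.List.pyGetD xs m 0) p) p))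
      ([1], 1)
    let invDenom := PySem.Int.powMod nd.2 (p - 2).toNat p
    let li := pvPolyScale nd.1 (PySem.Int.mod (yi * invDenom) p) p
    pvPolyAdd coeffs li p) (List.replicate k.toNat 0)
  (coeffs ++ List.replicate k.toNat 0).take k.toNat

def pvLoopA (xs : List Int) (fs : List (List Int)) (k p : Int) :
    List (List Int) → Int × Option (List Int) → Int × Option (List Int)
  | [], acc => acc
  | T :: rest, acc =>
    let n := xs.length
    let ell := fs.length
    let xT := T.map (fun i => PySem.List.pyGetD xs i 0)
    let coeffsList := (PySem.List.pyRange 0 (ell : Int) 1).foldl (fun cl j =>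
      let yT := T.map (fun i => PySem.List.pyGetD (PySem.List.pyGetD fs j []) i 0)
      cl ++ [pvInterpolateLagrange xT yT k p]) []
    let mtch := (PySem.List.pyRange 0 (ell : Int) 1).foldl (fun mtch j =>
      let cw := pvEvalPolyVector (PySem.List.pyGetD coeffsList j []) xs p
      (PySem.List.pyRange 0 (n : Int) 1).foldl (fun mtch i =>
        if PySem.List.pyGetD mtch i false ∧
            PySem.List.pyGetD cw i 0 ≠ PySem.List.pyGetD (PySem.List.pyGetD fs j []) i 0 then
          PySem.List.pySetD mtch i false
        else mtch) mtch) (List.replicate n true)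
    let S := (PySem.List.pyRange 0 (n : Int) 1).filter (fun i => PySem.List.pyGetD mtch i false)
    if (S.length : Int) > acc.1 then
      if (S.length : Int) = (n : Int) then ((S.length : Int), some S)
      else pvLoopA xs fs k p rest ((S.length : Int), some S)
    else pvLoopA xs fs k p rest acc

def mutual_agreement_max_witness (xs : List Int) (fs : List (List Int)) (k : Int) (p : Int) : Int × List Int :=
  let n := xs.length
  let r := pvLoopA xs fs k p (PySem.List.combinations (PySem.List.pyRange 0 (n : Int) 1) k.toNat) (-1, none)
  (r.1, r.2.getD [])

-- ===== PORT B =====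
def pvLagrangeEval (xT yT : List Int) (x k p : Int) : Int :=
  (PySem.List.pyRange 0 k 1).foldl (fun v a =>
    let term := (PySem.List.pyRange 0 k 1).foldl (fun term m =>
      if m = a then term
      else
        let term := PySem.Int.mod (term * PySem.Int.mod (x - PySem.List.pyGetD xT m 0) p) p
        PySem.Int.mod (term * PySem.Int.powMod
          (PySem.Int.mod (PySem.List.pyGetD xT a 0 - PySem.List.pyGetD xT m 0) p) (p - 2).toNat p) p)
      (PySem.Int.mod (PySem.List.pyGetD yT a 0) p)
    PySem.Int.mod (v + term) p) 0

def pvLoopB (xs : List Int) (fs : List (List Int)) (k p : Int) :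
    List (List Int) → Int × Option (List Int) → Int × Option (List Int)
  | [], acc => acc
  | T :: rest, acc =>
    let n := xs.length
    let ell := fs.length
    let xT := T.map (fun i => PySem.List.pyGetD xs i 0)
    let mtch := (PySem.List.pyRange 0 (ell : Int) 1).foldl (fun mtch j =>
      let f := PySem.List.pyGetD fs j []
      let yT := T.map (fun i => PySem.List.pyGetD f i 0)
      (PySem.List.pyRange 0 (n : Int) 1).foldl (fun mtch i =>
        if PySem.List.pyGetD mtch i false ∧
            pvLagrangeEval xT yT (PySem.List.pyGetD xs i 0) k p ≠ PySem.List.pyGetD f i 0 then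
          PySem.List.pySetD mtch i false
        else mtch) mtch) (List.replicate n true)
    let S := (PySem.List.pyRange 0 (n : Int) 1).filter (fun i => PySem.List.pyGetD mtch i false)
    if (S.length : Int) > acc.1 then
      if (S.length : Int) = (n : Int) then ((S.length : Int), some S)
      else pvLoopB xs fs k p rest ((S.length : Int), some S)
    else pvLoopB xs fs k p rest acc

def mutual_agreement_max_witness_alt (xs : List Int) (fs : List (List Int)) (k : Int) (p : Int) : Int × List Int :=
  let n := xs.length
  let r := pvLoopB xs fs k p (PySem.List.combinations (PySem.List.pyRange 0 (n : Int) 1) k.toNat) (-1, none)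
  (r.1, r.2.getD [])

-- ===== PRECONDITION & SPEC =====
-- Pre_ excludes: p ≤ 0 (p = 0 raises ZeroDivisionError; for p < 0 Python's pow with the
-- negative exponent p-2 raises ValueError whenever a Lagrange denominator is not invertible
-- mod p, e.g. on any duplicated interpolation point), k < 0 (combinations raises ValueError),
-- k > len(xs) (A returns best_S = None, which is not a value of the declared list type), and
-- rows of fs shorter than len(xs) (IndexError).
def Pre_mutual_agreement_max_witness (xs : List Int) (fs : List (List Int)) (k : Int) (p : Int) : Prop :=
  1 ≤ p ∧ 0 ≤ k ∧ k ≤ (xs.length : Int) ∧ ∀ f ∈ fs, xs.length ≤ f.length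
instance (xs : List Int) (fs : List (List Int)) (k : Int) (p : Int) : Decidable (Pre_mutual_agreement_max_witness xs fs k p) := by
  unfold Pre_mutual_agreement_max_witness; infer_instance

def pvWitness_mutual_agreement_max_witness : List Int × List (List Int) × Int × Int :=
  ([0, 1, 2], [[3, 4, 5]], 2, 7)

def Spec_mutual_agreement_max_witness (xs : List Int) (fs : List (List Int)) (k : Int) (p : Int) (out : Int × List Int) : Prop := out = mutual_agreement_max_witness_alt xs fs k p
instance (xs : List Int) (fs : List (List Int)) (k : Int) (p : Int) (out : Int × List Int) : Decidable (Spec_mutual_agreement_max_witness xs fs k p out) := by unfold Spec_mutual_agreement_max_witness; infer_instance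

-- ===== CLAIM (what is proved, stated in full; the proofs are below) =====
def Claim_equal_mutual_agreement_max_witness : Prop := ∀ (xs : List Int) (fs : List (List Int)) (k : Int) (p : Int), Dom_mutual_agreement_max_witness xs fs k p → Pre_mutual_agreement_max_witness xs fs k p → Spec_mutual_agreement_max_witness xs fs k p (mutual_agreement_max_witness xs fs k p)

-- ===== LEMMAS AND PROOFS =====

-- reference semantics: plain (un-reduced) polynomial evaluation
def evalP (l : List Int) (x : Int) : Int := l.foldr (fun c acc => c + x * acc) 0

-- reference value of the Lagrange interpolant at x (one common formula both sides meet)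
def pvRef (xT yT : List Int) (kk : Nat) (p x : Int) : Int :=
  ∑ a ∈ Finset.range kk, (yT.getD a 0) *
    ∏ m ∈ Finset.range kk,
      (if m = a then 1 else (x - xT.getD m 0) * (xT.getD a 0 - xT.getD m 0) ^ (p - 2).toNat)

theorem pv_mod_congr {p a b : Int} (hp : 0 < p) (h : a ≡ b [ZMOD p]) :
    PySem.Int.mod a p = PySem.Int.mod b p := by
  rw [PySem.Int.mod_eq_emod_of_pos hp, PySem.Int.mod_eq_emod_of_pos hp]; exact h

theorem pv_mod_modEq {p : Int} (hp : 0 < p) (a : Int) : PySem.Int.mod a p ≡ a [ZMOD p] := by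
  rw [PySem.Int.mod_eq_emod_of_pos hp]; exact Int.emod_emod_of_dvd a dvd_rfl

theorem pv_mod_mod {p : Int} (hp : 0 < p) (a : Int) :
    PySem.Int.mod (PySem.Int.mod a p) p = PySem.Int.mod a p := by
  rw [PySem.Int.mod_eq_emod_of_pos hp (a := a), PySem.Int.mod_eq_emod_of_pos hp]
  exact Int.emod_emod_of_dvd _ dvd_rfl

theorem evalP_nil (x : Int) : evalP [] x = 0 := rfl
theorem evalP_cons (c : Int) (t : List Int) (x : Int) : evalP (c :: t) x = c + x * evalP t x := rfl

theorem pvPolyEval_eq (l : List Int) (x p : Int) (hp : 0 < p) :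
    pvPolyEval l x p = PySem.Int.mod (evalP l x) p := by
  induction l with
  | nil =>
    show (0 : Int) = PySem.Int.mod 0 p
    rw [PySem.Int.mod_eq_emod_of_pos hp]; simp
  | cons c t ih =>
    have hrw : pvPolyEval (c :: t) x p = PySem.Int.mod (pvPolyEval t x p * x + c) p := by
      simp only [pvPolyEval, List.reverse_cons, List.foldl_append, List.foldl_cons, List.foldl_nil]
    rw [hrw]
    rw [ih, evalP_cons]
    apply pv_mod_congr hp
    have h1 : PySem.Int.mod (evalP t x) p * x + c ≡ evalP t x * x + c [ZMOD p] :=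
      ((pv_mod_modEq hp (evalP t x)).mul_right x).add_right c
    have h2 : evalP t x * x + c = c + x * evalP t x := by ring
    rw [h2] at h1; exact h1

theorem evalP_set (l : List Int) (t : Nat) (w x : Int) (ht : t < l.length) :
    evalP (l.set t w) x = evalP l x + (w - l.getD t 0) * x ^ t := by
  induction l generalizing t with
  | nil => simp at ht
  | cons c tl ih =>
    cases t with
    | zero => simp [evalP_cons]; ring
    | succ t =>
      simp only [List.set_cons_succ, evalP_cons, List.getD_cons_succ]
      rw [ih t (by simpa using ht)]
      ring

theorem evalP_replicate (n : Nat) (x : Int) : evalP (List.replicate n 0) x = 0 := by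
  induction n with
  | zero => rfl
  | succ n ih => simp [List.replicate_succ, evalP_cons, ih]

theorem evalP_eq_sum_getD (l : List Int) (m : Nat) (x : Int) (h : l.length ≤ m) :
    ∑ i ∈ Finset.range m, l.getD i 0 * x ^ i = evalP l x := by
  induction l generalizing m with
  | nil => simp [evalP_nil]
  | cons c t ih =>
    cases m with
    | zero => simp at h
    | succ m =>
      rw [Finset.sum_range_succ']
      simp only [List.getD_cons_succ, List.getD_cons_zero, pow_zero, mul_one, evalP_cons]
      have h2 : ∑ i ∈ Finset.range m, t.getD i 0 * x ^ (i + 1) =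
          x * ∑ i ∈ Finset.range m, t.getD i 0 * x ^ i := by
        rw [Finset.mul_sum]; apply Finset.sum_congr rfl; intro i _; ring
      rw [h2, ih m (by simpa using h)]
      ring

def addStep (a b : List Int) (p : Int) (out : List Int) (i : Int) : List Int :=
  let out := if i < (a.length : Int) then
      PySem.List.pySetD out i (PySem.Int.mod (PySem.List.pyGetD out i 0 + PySem.List.pyGetD a i 0) p)
    else out
  if i < (b.length : Int) then
    PySem.List.pySetD out i (PySem.Int.mod (PySem.List.pyGetD out i 0 + PySem.List.pyGetD b i 0) p)
  else out

theorem getD_set_self (l : List Int) (t : Nat) (v : Int) (h : t < l.length) :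
    (l.set t v).getD t 0 = v := by
  rw [List.getD_eq_getElem?_getD, List.getElem?_set_self]
  · rfl
  · exact h

theorem getD_set_ne (l : List Int) (t idx : Nat) (v : Int) (h : t ≠ idx) :
    (l.set t v).getD idx 0 = l.getD idx 0 := by
  rw [List.getD_eq_getElem?_getD, List.getElem?_set_ne h, ← List.getD_eq_getElem?_getD]

theorem polyAdd_aux (a b : List Int) (p x : Int) (hp : 0 < p) (m : Nat)
    (hm : m = max a.length b.length) :
    ∀ t : Nat, t ≤ m →
      ((PySem.List.pyRange 0 (t : Int) 1).foldl (addStep a b p) (List.replicate m 0)).length = m ∧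
      (∀ idx : Nat, t ≤ idx →
        ((PySem.List.pyRange 0 (t : Int) 1).foldl (addStep a b p) (List.replicate m 0)).getD idx 0 = 0) ∧
      evalP ((PySem.List.pyRange 0 (t : Int) 1).foldl (addStep a b p) (List.replicate m 0)) x ≡
        ∑ i ∈ Finset.range t, (a.getD i 0 + b.getD i 0) * x ^ i [ZMOD p] := by
  intro t
  induction t with
  | zero =>
    intro _
    rw [show ((0 : Nat) : Int) = 0 by norm_num, PySem.List.pyRange_one_eq_nil le_rfl]
    refine ⟨by simp, fun idx _ => by simp [List.getD_eq_getElem?_getD, List.getElem?_replicate]; split <;> rfl, ?_⟩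
    simp [evalP_replicate]
  | succ t ih =>
    intro ht
    obtain ⟨hlen, hzero, hcong⟩ := ih (by omega)
    set F := (PySem.List.pyRange 0 (t : Int) 1).foldl (addStep a b p) (List.replicate m 0) with hF
    have hstep : (PySem.List.pyRange 0 ((t + 1 : Nat) : Int) 1).foldl (addStep a b p) (List.replicate m 0)
        = addStep a b p F (t : Int) := by
      rw [show (((t + 1 : Nat)) : Int) = (t : Int) + 1 by push_cast; ring,
        PySem.List.pyRange_one_succ_right (by positivity), List.foldl_append]
      rfl
    have htm : t < m := by omega
    have hFt : F.getD t 0 = 0 := hzero t le_rfl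
    have hab : t < a.length ∨ t < b.length := by omega
    rw [hstep]
    unfold addStep
    simp only [PySem.List.pySetD_natCast, PySem.List.pyGetD_natCast, Nat.cast_lt]
    have hsum : ∑ i ∈ Finset.range (t + 1), (a.getD i 0 + b.getD i 0) * x ^ i =
        (∑ i ∈ Finset.range t, (a.getD i 0 + b.getD i 0) * x ^ i) + (a.getD t 0 + b.getD t 0) * x ^ t :=
      Finset.sum_range_succ _ _
    by_cases ha : t < a.length <;> by_cases hb : t < b.length <;>
      simp only [ha, hb, if_false, if_pos] <;> rw [hsum]
    · -- both
      set w1 := PySem.Int.mod (F.getD t 0 + a.getD t 0) p with hw1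
      have hgd : (F.set t w1).getD t 0 = w1 := getD_set_self F t w1 (by omega)
      rw [hgd]
      set w2 := PySem.Int.mod (w1 + b.getD t 0) p with hw2
      refine ⟨by simp [List.length_set, hlen], fun idx hidx => ?_, ?_⟩
      · rw [getD_set_ne _ _ _ _ (by omega), getD_set_ne _ _ _ _ (by omega)]
        exact hzero idx (by omega)
      · rw [evalP_set _ _ _ _ (by rw [List.length_set]; omega),
          evalP_set _ _ _ _ (by omega), hgd, hFt]
        have hw1c : w1 ≡ a.getD t 0 [ZMOD p] := by
          rw [hw1, hFt, zero_add]; exact pv_mod_modEq hp _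
        have hw2c : w2 ≡ a.getD t 0 + b.getD t 0 [ZMOD p] :=
          (pv_mod_modEq hp _).trans (hw1c.add_right _)
        calc evalP F x + (w1 - 0) * x ^ t + (w2 - w1) * x ^ t
            = evalP F x + w2 * x ^ t := by ring
          _ ≡ (∑ i ∈ Finset.range t, (a.getD i 0 + b.getD i 0) * x ^ i)
              + (a.getD t 0 + b.getD t 0) * x ^ t [ZMOD p] :=
            hcong.add (hw2c.mul_right _)
    · -- only a
      refine ⟨by simp [List.length_set, hlen], fun idx hidx => ?_, ?_⟩
      · rw [getD_set_ne _ _ _ _ (by omega)]; exact hzero idx (by omega)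
      · rw [evalP_set _ _ _ _ (by omega), hFt]
        have : b.getD t 0 = 0 := List.getD_eq_default _ _ (by omega)
        rw [this]
        have hw1c : PySem.Int.mod (0 + a.getD t 0) p - 0 ≡ a.getD t 0 + 0 [ZMOD p] := by
          rw [sub_zero, zero_add, add_zero]; exact pv_mod_modEq hp _
        exact hcong.add (hw1c.mul_right _)
    · -- only b
      refine ⟨by simp [List.length_set, hlen], fun idx hidx => ?_, ?_⟩
      · rw [getD_set_ne _ _ _ _ (by omega)]; exact hzero idx (by omega)
      · rw [evalP_set _ _ _ _ (by omega), hFt]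
        have : a.getD t 0 = 0 := List.getD_eq_default _ _ (by omega)
        rw [this]
        have hw1c : PySem.Int.mod (0 + b.getD t 0) p - 0 ≡ 0 + b.getD t 0 [ZMOD p] := by
          rw [sub_zero, zero_add]; exact pv_mod_modEq hp _
        exact hcong.add (hw1c.mul_right _)
    · omega

theorem evalP_polyAdd (a b : List Int) (p x : Int) (hp : 0 < p) :
    (pvPolyAdd a b p).length = max a.length b.length ∧
    evalP (pvPolyAdd a b p) x ≡ evalP a x + evalP b x [ZMOD p] := by
  have hdef : pvPolyAdd a b p = (PySem.List.pyRange 0 ((max a.length b.length : Nat) : Int) 1).foldl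
      (addStep a b p) (List.replicate (max a.length b.length) 0) := rfl
  obtain ⟨h1, h2, h3⟩ := polyAdd_aux a b p x hp (max a.length b.length) rfl (max a.length b.length) le_rfl
  refine ⟨by rw [hdef]; exact h1, ?_⟩
  rw [hdef]
  refine h3.trans ?_
  have := Finset.sum_congr rfl (fun i (_ : i ∈ Finset.range (max a.length b.length)) =>
    (add_mul (a.getD i 0) (b.getD i 0) (x ^ i)))
  rw [this, Finset.sum_add_distrib,
    evalP_eq_sum_getD a _ x (le_max_left _ _), evalP_eq_sum_getD b _ x (le_max_right _ _)]

theorem mul_inner (p x ai : Int) (hp : 0 < p) :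
    ∀ (b : List Int) (s : Nat) (out : List Int) (i : Nat),
      i + s + b.length ≤ out.length →
      (((PySem.List.enumerate b (s : Int)).foldl
        (fun out jb => PySem.List.pySetD out ((i : Int) + jb.1)
          (PySem.Int.mod (PySem.List.pyGetD out ((i : Int) + jb.1) 0 + ai * jb.2) p)) out)).length = out.length ∧
      evalP ((PySem.List.enumerate b (s : Int)).foldl
        (fun out jb => PySem.List.pySetD out ((i : Int) + jb.1)
          (PySem.Int.mod (PySem.List.pyGetD out ((i : Int) + jb.1) 0 + ai * jb.2) p)) out) x ≡
        evalP out x + ai * x ^ (i + s) * evalP b x [ZMOD p] := by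
  intro b
  induction b with
  | nil =>
    intro s out i _
    refine ⟨by simp [PySem.List.enumerate_nil], ?_⟩
    rw [show evalP out x + ai * x ^ (i + s) * evalP [] x = evalP out x by rw [evalP_nil]; ring]
    simp [PySem.List.enumerate_nil]
  | cons b0 bt ih =>
    intro s out i hb
    rw [PySem.List.enumerate_cons, List.foldl_cons]
    have hc : ((i : Int) + (s : Int)) = (((i + s : Nat)) : Int) := by push_cast; ring
    simp only [hc, PySem.List.pySetD_natCast, PySem.List.pyGetD_natCast]
    set c := out.getD (i + s) 0 with hcdef
    set w := PySem.Int.mod (c + ai * b0) p with hwdef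
    have hlt : i + s < out.length := by simp at hb; omega
    have hset : (out.set (i + s) w).length = out.length := by simp
    have hcast : ((s : Int) + 1) = (((s + 1 : Nat)) : Int) := by push_cast; ring
    rw [hcast]
    obtain ⟨hl, hcong⟩ := ih (s + 1) (out.set (i + s) w) i (by simp at hb ⊢; omega)
    refine ⟨by rw [hl, hset], ?_⟩
    refine hcong.trans ?_
    rw [evalP_set _ _ _ _ hlt, ← hcdef]
    have hwc : w - c ≡ ai * b0 [ZMOD p] := by
      have := (pv_mod_modEq hp (c + ai * b0)).sub_right c
      rw [show c + ai * b0 - c = ai * b0 by ring] at this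
      exact this
    have step : evalP out x + (w - c) * x ^ (i + s) + ai * x ^ (i + (s + 1)) * evalP bt x ≡
        evalP out x + ai * b0 * x ^ (i + s) + ai * x ^ (i + (s + 1)) * evalP bt x [ZMOD p] :=
      Int.ModEq.add_right _ (Int.ModEq.add_left _ (hwc.mul_right _))
    refine step.trans ?_
    rw [show evalP out x + ai * b0 * x ^ (i + s) + ai * x ^ (i + (s + 1)) * evalP bt x =
        evalP out x + ai * x ^ (i + s) * evalP (b0 :: bt) x by rw [evalP_cons]; ring]

theorem mul_outer (b : List Int) (p x : Int) (hp : 0 < p) :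
    ∀ (a : List Int) (s : Nat) (out : List Int),
      s + a.length + b.length ≤ out.length + 1 →
      (((PySem.List.enumerate a (s : Int)).foldl (fun out ia =>
        (PySem.List.enumerate b 0).foldl
          (fun out jb => PySem.List.pySetD out (ia.1 + jb.1)
            (PySem.Int.mod (PySem.List.pyGetD out (ia.1 + jb.1) 0 + ia.2 * jb.2) p)) out) out)).length = out.length ∧
      evalP ((PySem.List.enumerate a (s : Int)).foldl (fun out ia =>
        (PySem.List.enumerate b 0).foldl
          (fun out jb => PySem.List.pySetD out (ia.1 + jb.1)
            (PySem.Int.mod (PySem.List.pyGetD out (ia.1 + jb.1) 0 + ia.2 * jb.2) p)) out) out) x ≡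
        evalP out x + x ^ s * evalP a x * evalP b x [ZMOD p] := by
  intro a
  induction a with
  | nil =>
    intro s out _
    refine ⟨by simp [PySem.List.enumerate_nil], ?_⟩
    rw [show evalP out x + x ^ s * evalP [] x * evalP b x = evalP out x by rw [evalP_nil]; ring]
    simp [PySem.List.enumerate_nil]
  | cons a0 at_ ih =>
    intro s out hbound
    rw [PySem.List.enumerate_cons, List.foldl_cons]
    have hred : (PySem.List.enumerate b 0).foldl
          (fun out jb => PySem.List.pySetD out ((((s : Int), a0)).1 + jb.1)
            (PySem.Int.mod (PySem.List.pyGetD out ((((s : Int), a0)).1 + jb.1) 0 + (((s : Int), a0)).2 * jb.2) p)) out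
        = (PySem.List.enumerate b 0).foldl
          (fun out jb => PySem.List.pySetD out ((s : Int) + jb.1)
            (PySem.Int.mod (PySem.List.pyGetD out ((s : Int) + jb.1) 0 + a0 * jb.2) p)) out := rfl
    rw [hred]
    obtain ⟨hl1, hc1⟩ := by
      refine mul_inner p x a0 hp b 0 out s ?_
      simp at hbound ⊢; omega
    simp only [Nat.cast_zero] at hl1 hc1
    set out1 := (PySem.List.enumerate b (0 : Int)).foldl
      (fun out jb => PySem.List.pySetD out ((s : Int) + jb.1)
        (PySem.Int.mod (PySem.List.pyGetD out ((s : Int) + jb.1) 0 + a0 * jb.2) p)) out with hout1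
    have hcast : ((s : Int) + 1) = (((s + 1 : Nat)) : Int) := by push_cast; ring
    rw [hcast]
    obtain ⟨hl2, hc2⟩ := ih (s + 1) out1 (by rw [hl1]; simp at hbound ⊢; omega)
    refine ⟨by rw [hl2, hl1], ?_⟩
    refine hc2.trans ?_
    have hc1' := hc1.add_right (x ^ (s + 1) * evalP at_ x * evalP b x)
    refine hc1'.trans ?_
    rw [show evalP out x + a0 * x ^ (s + 0) * evalP b x + x ^ (s + 1) * evalP at_ x * evalP b x =
        evalP out x + x ^ s * evalP (a0 :: at_) x * evalP b x by rw [evalP_cons]; ring]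

theorem evalP_polyMul (a b : List Int) (p x : Int) (hp : 0 < p) :
    (pvPolyMul a b p).length = a.length + b.length - 1 ∧
    evalP (pvPolyMul a b p) x ≡ evalP a x * evalP b x [ZMOD p] := by
  have hdef : pvPolyMul a b p = (PySem.List.enumerate a (0 : Int)).foldl (fun out ia =>
      (PySem.List.enumerate b 0).foldl
        (fun out jb => PySem.List.pySetD out (ia.1 + jb.1)
          (PySem.Int.mod (PySem.List.pyGetD out (ia.1 + jb.1) 0 + ia.2 * jb.2) p)) out)
      (List.replicate (a.length + b.length - 1) 0) := rfl
  obtain ⟨hl, hc⟩ := mul_outer b p x hp a 0 (List.replicate (a.length + b.length - 1) 0)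
    (by simp; omega)
  simp only [Nat.cast_zero] at hl hc
  refine ⟨by rw [hdef, hl]; simp, ?_⟩
  rw [hdef]
  refine hc.trans ?_
  rw [evalP_replicate, pow_zero]
  rw [show (0 : Int) + 1 * evalP a x * evalP b x = evalP a x * evalP b x by ring]

theorem evalP_polyScale (a : List Int) (s p x : Int) (hp : 0 < p) :
    (pvPolyScale a s p).length = a.length ∧
    evalP (pvPolyScale a s p) x ≡ s * evalP a x [ZMOD p] := by
  refine ⟨List.length_map .., ?_⟩
  induction a with
  | nil =>
    rw [show s * evalP [] x = 0 by rw [evalP_nil]; ring]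
    exact Int.ModEq.refl 0
  | cons a0 t ih =>
    show evalP (PySem.Int.mod (a0 * s) p :: pvPolyScale t s p) x ≡ _ [ZMOD p]
    rw [evalP_cons, evalP_cons]
    refine ((pv_mod_modEq hp (a0 * s)).add (ih.mul_left x)).trans ?_
    rw [show a0 * s + x * (s * evalP t x) = s * (a0 + x * evalP t x) by ring]

-- the two loop-step functions of interpolate_lagrange, named for the proofs
def pvInnerStep (xT : List Int) (xi p i : Int) (nd : List Int × Int) (m : Int) : List Int × Int :=
  if m = i then nd
  else (pvPolyMul nd.1 [PySem.Int.mod (-(PySem.List.pyGetD xT m 0)) p, 1] p,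
        PySem.Int.mod (nd.2 * PySem.Int.mod (xi - PySem.List.pyGetD xT m 0) p) p)

def pvInterpStep (xT yT : List Int) (k p : Int) (coeffs : List Int) (i : Int) : List Int :=
  let xi := PySem.Int.mod (PySem.List.pyGetD xT i 0) p
  let yi := PySem.Int.mod (PySem.List.pyGetD yT i 0) p
  let nd := (PySem.List.pyRange 0 k 1).foldl (pvInnerStep xT xi p i) ([1], 1)
  let invDenom := PySem.Int.powMod nd.2 (p - 2).toNat p
  let li := pvPolyScale nd.1 (PySem.Int.mod (yi * invDenom) p) p
  pvPolyAdd coeffs li p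

theorem interp_inner (xT : List Int) (p x xi : Int) (hp : 0 < p) (inat : Nat)
    (hxi : xi ≡ xT.getD inat 0 [ZMOD p]) :
    ∀ t : Nat,
      ((PySem.List.pyRange 0 (t : Int) 1).foldl (pvInnerStep xT xi p (inat : Int)) ([1], 1)).1.length
        = t + 1 - (if inat < t then 1 else 0) ∧
      evalP ((PySem.List.pyRange 0 (t : Int) 1).foldl (pvInnerStep xT xi p (inat : Int)) ([1], 1)).1 x ≡
        ∏ m ∈ Finset.range t, (if m = inat then 1 else (x - xT.getD m 0)) [ZMOD p] ∧
      ((PySem.List.pyRange 0 (t : Int) 1).foldl (pvInnerStep xT xi p (inat : Int)) ([1], 1)).2 ≡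
        ∏ m ∈ Finset.range t, (if m = inat then 1 else (xT.getD inat 0 - xT.getD m 0)) [ZMOD p] := by
  intro t
  induction t with
  | zero =>
    rw [show ((0 : Nat) : Int) = 0 by norm_num, PySem.List.pyRange_one_eq_nil le_rfl]
    refine ⟨by simp, ?_, ?_⟩
    · show evalP [1] x ≡ _ [ZMOD p]
      rw [show evalP [1] x = 1 by simp [evalP]]
      simp
    · simp
  | succ t ih =>
    obtain ⟨hlen, hnum, hden⟩ := ih
    rw [show (((t + 1 : Nat)) : Int) = (t : Int) + 1 by push_cast; ring,
      PySem.List.pyRange_one_succ_right (by positivity), List.foldl_append, List.foldl_cons,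
      List.foldl_nil]
    set nd := (PySem.List.pyRange 0 (t : Int) 1).foldl (pvInnerStep xT xi p (inat : Int)) ([1], 1) with hnd
    by_cases hti : t = inat
    · subst hti
      rw [pvInnerStep, if_pos rfl]
      refine ⟨by rw [hlen]; simp, ?_, ?_⟩
      · refine hnum.trans ?_
        rw [Finset.prod_range_succ, if_pos rfl, mul_one]
      · refine hden.trans ?_
        rw [Finset.prod_range_succ, if_pos rfl, mul_one]
    · rw [pvInnerStep, if_neg (show ¬((t : Int) = (inat : Int)) by exact_mod_cast hti)]
      simp only [PySem.List.pyGetD_natCast]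
      obtain ⟨hml, hmc⟩ := evalP_polyMul nd.1
        [PySem.Int.mod (-(xT.getD t 0)) p, 1] p x hp
      refine ⟨?_, ?_, ?_⟩
      · show (pvPolyMul nd.1 _ p).length = _
        rw [hml, hlen]
        simp only [List.length_cons, List.length_nil]
        split_ifs <;> omega
      · refine hmc.trans ?_
        have h1 : evalP [PySem.Int.mod (-(xT.getD t 0)) p, 1] x ≡ x - xT.getD t 0 [ZMOD p] := by
          rw [show evalP [PySem.Int.mod (-(xT.getD t 0)) p, 1] x
              = PySem.Int.mod (-(xT.getD t 0)) p + x by simp [evalP]]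
          refine ((pv_mod_modEq hp _).add_right x).trans ?_
          rw [show -(xT.getD t 0) + x = x - xT.getD t 0 by ring]
        refine (hnum.mul h1).trans ?_
        rw [Finset.prod_range_succ, if_neg hti]
      · show PySem.Int.mod (nd.2 * PySem.Int.mod (xi - xT.getD t 0) p) p ≡ _ [ZMOD p]
        refine (pv_mod_modEq hp _).trans ?_
        have h2 : PySem.Int.mod (xi - xT.getD t 0) p ≡ xT.getD inat 0 - xT.getD t 0 [ZMOD p] :=
          (pv_mod_modEq hp _).trans (hxi.sub_right _)
        refine (hden.mul h2).trans ?_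
        rw [Finset.prod_range_succ, if_neg hti]

theorem prod_split (kk a e : Nat) (u v : Nat → Int) :
    ∏ m ∈ Finset.range kk, (if m = a then 1 else u m * v m ^ e)
      = (∏ m ∈ Finset.range kk, (if m = a then 1 else v m)) ^ e
        * ∏ m ∈ Finset.range kk, (if m = a then 1 else u m) := by
  rw [← Finset.prod_pow, ← Finset.prod_mul_distrib]
  refine Finset.prod_congr rfl fun m _ => ?_
  split_ifs <;> simp [mul_comm]

theorem interp_outer (xT yT : List Int) (p x : Int) (hp : 0 < p) (kk : Nat) :
    ∀ t : Nat, t ≤ kk →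
      ((PySem.List.pyRange 0 (t : Int) 1).foldl (pvInterpStep xT yT (kk : Int) p)
        (List.replicate kk 0)).length = kk ∧
      evalP ((PySem.List.pyRange 0 (t : Int) 1).foldl (pvInterpStep xT yT (kk : Int) p)
        (List.replicate kk 0)) x ≡
        ∑ a ∈ Finset.range t, yT.getD a 0 *
          ∏ m ∈ Finset.range kk,
            (if m = a then 1
             else (x - xT.getD m 0) * (xT.getD a 0 - xT.getD m 0) ^ (p - 2).toNat) [ZMOD p] := by
  intro t
  induction t with
  | zero =>
    intro _
    rw [show ((0 : Nat) : Int) = 0 by norm_num, PySem.List.pyRange_one_eq_nil le_rfl]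
    refine ⟨by simp, ?_⟩
    simp [evalP_replicate]
  | succ t iht =>
    intro ht
    obtain ⟨hlen, hcong⟩ := iht (by omega)
    rw [show (((t + 1 : Nat)) : Int) = (t : Int) + 1 by push_cast; ring,
      PySem.List.pyRange_one_succ_right (by positivity), List.foldl_append, List.foldl_cons,
      List.foldl_nil]
    set C := (PySem.List.pyRange 0 (t : Int) 1).foldl (pvInterpStep xT yT (kk : Int) p)
      (List.replicate kk 0) with hC
    simp only [pvInterpStep, PySem.List.pyGetD_natCast]
    set xi := PySem.Int.mod (xT.getD t 0) p with hxidef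
    have hxi : xi ≡ xT.getD t 0 [ZMOD p] := pv_mod_modEq hp _
    obtain ⟨hil, hinum, hiden⟩ := interp_inner xT p x xi hp t hxi kk
    set nd := (PySem.List.pyRange 0 (kk : Int) 1).foldl (pvInnerStep xT xi p (t : Int)) ([1], 1)
      with hnd
    set e := (p - 2).toNat with he
    set sc := PySem.Int.mod (PySem.Int.mod (yT.getD t 0) p * PySem.Int.powMod nd.2 e p) p with hsc
    have hndl : nd.1.length = kk := by rw [hil, if_pos (show t < kk by omega)]; omega
    obtain ⟨hsl, hscong⟩ := evalP_polyScale nd.1 sc p x hp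
    obtain ⟨hal, hacong⟩ := evalP_polyAdd C (pvPolyScale nd.1 sc p) p x hp
    refine ⟨by rw [hal, hlen, hsl, hndl]; omega, ?_⟩
    have hinv : PySem.Int.powMod nd.2 e p ≡
        (∏ m ∈ Finset.range kk, (if m = t then 1 else (xT.getD t 0 - xT.getD m 0))) ^ e
        [ZMOD p] := by
      show PySem.Int.mod (nd.2 ^ e) p ≡ _ [ZMOD p]
      exact (pv_mod_modEq hp _).trans (hiden.pow e)
    have hsccong : sc ≡ yT.getD t 0 *
        (∏ m ∈ Finset.range kk, (if m = t then 1 else (xT.getD t 0 - xT.getD m 0))) ^ e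
        [ZMOD p] :=
      (pv_mod_modEq hp _).trans ((pv_mod_modEq hp _).mul hinv)
    have hli : evalP (pvPolyScale nd.1 sc p) x ≡
        yT.getD t 0 *
          ∏ m ∈ Finset.range kk,
            (if m = t then 1 else (x - xT.getD m 0) * (xT.getD t 0 - xT.getD m 0) ^ e)
        [ZMOD p] := by
      refine hscong.trans ((hsccong.mul hinum).trans ?_)
      rw [prod_split kk t e (fun m => x - xT.getD m 0) (fun m => xT.getD t 0 - xT.getD m 0)]
      rw [mul_assoc]
    refine hacong.trans ((hcong.add hli).trans ?_)
    rw [Finset.sum_range_succ]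

theorem interp_eval (xT yT : List Int) (k p x : Int) (hp : 0 < p) (hk : 0 ≤ k) :
    pvPolyEval (pvInterpolateLagrange xT yT k p) x p =
      PySem.Int.mod (pvRef xT yT k.toNat p x) p := by
  have hdef : pvInterpolateLagrange xT yT k p =
      (((PySem.List.pyRange 0 k 1).foldl (pvInterpStep xT yT k p) (List.replicate k.toNat 0))
        ++ List.replicate k.toNat 0).take k.toNat := rfl
  have hkc : ((k.toNat : Nat) : Int) = k := Int.toNat_of_nonneg hk
  obtain ⟨hlen, hcong⟩ := by
    refine interp_outer xT yT p x hp k.toNat k.toNat le_rfl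
  rw [hkc] at hlen hcong
  rw [hdef, List.take_left' hlen, pvPolyEval_eq _ _ _ hp]
  refine pv_mod_congr hp (hcong.trans ?_)
  rw [pvRef]

-- the two loop-step functions of lagrange_eval, named for the proofs
def pvTermStep (xT : List Int) (x p a : Int) (term m : Int) : Int :=
  if m = a then term
  else PySem.Int.mod (PySem.Int.mod (term * PySem.Int.mod (x - PySem.List.pyGetD xT m 0) p) p *
    PySem.Int.powMod (PySem.Int.mod (PySem.List.pyGetD xT a 0 - PySem.List.pyGetD xT m 0) p)
      (p - 2).toNat p) p

def pvVStep (xT yT : List Int) (x k p : Int) (v a : Int) : Int :=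
  PySem.Int.mod (v + (PySem.List.pyRange 0 k 1).foldl (pvTermStep xT x p a)
    (PySem.Int.mod (PySem.List.pyGetD yT a 0) p)) p

theorem bterm (xT yT : List Int) (x p : Int) (hp : 0 < p) (anat : Nat) :
    ∀ t : Nat,
      (PySem.List.pyRange 0 (t : Int) 1).foldl (pvTermStep xT x p (anat : Int))
        (PySem.Int.mod (PySem.List.pyGetD yT (anat : Int) 0) p) ≡
      yT.getD anat 0 *
        ∏ m ∈ Finset.range t,
          (if m = anat then 1
           else (x - xT.getD m 0) * (xT.getD anat 0 - xT.getD m 0) ^ (p - 2).toNat) [ZMOD p] := by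
  intro t
  induction t with
  | zero =>
    rw [show ((0 : Nat) : Int) = 0 by norm_num, PySem.List.pyRange_one_eq_nil le_rfl]
    simp only [List.foldl_nil, Finset.range_zero, Finset.prod_empty, mul_one,
      PySem.List.pyGetD_natCast]
    exact pv_mod_modEq hp _
  | succ t ih =>
    rw [show (((t + 1 : Nat)) : Int) = (t : Int) + 1 by push_cast; ring,
      PySem.List.pyRange_one_succ_right (by positivity), List.foldl_append, List.foldl_cons,
      List.foldl_nil]
    set T := (PySem.List.pyRange 0 (t : Int) 1).foldl (pvTermStep xT x p (anat : Int))
      (PySem.Int.mod (PySem.List.pyGetD yT (anat : Int) 0) p) with hT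
    by_cases hta : t = anat
    · subst hta
      rw [pvTermStep, if_pos rfl]
      refine ih.trans ?_
      rw [Finset.prod_range_succ, if_pos rfl, mul_one]
    · rw [pvTermStep, if_neg (show ¬((t : Int) = (anat : Int)) by exact_mod_cast hta),
        PySem.List.pyGetD_natCast, PySem.List.pyGetD_natCast]
      have h1 : PySem.Int.mod (T * PySem.Int.mod (x - xT.getD t 0) p) p ≡
          T * (x - xT.getD t 0) [ZMOD p] :=
        (pv_mod_modEq hp _).trans ((pv_mod_modEq hp _).mul_left T)
      have h2 : PySem.Int.powMod (PySem.Int.mod (xT.getD anat 0 - xT.getD t 0) p) (p - 2).toNat p ≡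
          (xT.getD anat 0 - xT.getD t 0) ^ (p - 2).toNat [ZMOD p] := by
        show PySem.Int.mod _ p ≡ _ [ZMOD p]
        exact (pv_mod_modEq hp _).trans ((pv_mod_modEq hp _).pow _)
      refine ((pv_mod_modEq hp _).trans (h1.mul h2)).trans ?_
      refine ((ih.mul_right _).mul_right _).trans ?_
      have heq : yT.getD anat 0 *
          (∏ m ∈ Finset.range t,
            (if m = anat then 1
             else (x - xT.getD m 0) * (xT.getD anat 0 - xT.getD m 0) ^ (p - 2).toNat)) *
          (x - xT.getD t 0) * (xT.getD anat 0 - xT.getD t 0) ^ (p - 2).toNat =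
          yT.getD anat 0 *
          ((∏ m ∈ Finset.range t,
            (if m = anat then 1
             else (x - xT.getD m 0) * (xT.getD anat 0 - xT.getD m 0) ^ (p - 2).toNat)) *
           ((x - xT.getD t 0) * (xT.getD anat 0 - xT.getD t 0) ^ (p - 2).toNat)) := by ring
      rw [Finset.prod_range_succ, if_neg hta, ← heq]

theorem bv (xT yT : List Int) (x p : Int) (hp : 0 < p) (kk : Nat) :
    ∀ t : Nat,
      PySem.Int.mod ((PySem.List.pyRange 0 (t : Int) 1).foldl
          (pvVStep xT yT x (kk : Int) p) 0) p =
        (PySem.List.pyRange 0 (t : Int) 1).foldl (pvVStep xT yT x (kk : Int) p) 0 ∧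
      (PySem.List.pyRange 0 (t : Int) 1).foldl (pvVStep xT yT x (kk : Int) p) 0 ≡
        ∑ a ∈ Finset.range t, yT.getD a 0 *
          ∏ m ∈ Finset.range kk,
            (if m = a then 1
             else (x - xT.getD m 0) * (xT.getD a 0 - xT.getD m 0) ^ (p - 2).toNat) [ZMOD p] := by
  intro t
  induction t with
  | zero =>
    rw [show ((0 : Nat) : Int) = 0 by norm_num, PySem.List.pyRange_one_eq_nil le_rfl]
    refine ⟨?_, by simp⟩
    rw [PySem.Int.mod_eq_emod_of_pos hp]
    simp
  | succ t ih =>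
    obtain ⟨ihm, ihc⟩ := ih
    rw [show (((t + 1 : Nat)) : Int) = (t : Int) + 1 by push_cast; ring,
      PySem.List.pyRange_one_succ_right (by positivity), List.foldl_append, List.foldl_cons,
      List.foldl_nil]
    set v := (PySem.List.pyRange 0 (t : Int) 1).foldl (pvVStep xT yT x (kk : Int) p) 0 with hv
    constructor
    · exact pv_mod_mod hp _
    · show PySem.Int.mod (v + _) p ≡ _ [ZMOD p]
      refine (pv_mod_modEq hp _).trans ?_
      refine (ihc.add (bterm xT yT x p hp t kk)).trans ?_
      rw [Finset.sum_range_succ]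

theorem lagrangeEval_eq (xT yT : List Int) (x k p : Int) (hp : 0 < p) (hk : 0 ≤ k) :
    pvLagrangeEval xT yT x k p = PySem.Int.mod (pvRef xT yT k.toNat p x) p := by
  have hdef : pvLagrangeEval xT yT x k p =
      (PySem.List.pyRange 0 k 1).foldl (pvVStep xT yT x k p) 0 := rfl
  have hkc : ((k.toNat : Nat) : Int) = k := Int.toNat_of_nonneg hk
  obtain ⟨hm, hc⟩ := bv xT yT x p hp k.toNat k.toNat
  rw [hkc] at hm hc
  rw [hdef, ← hm]
  refine pv_mod_congr hp (hc.trans ?_)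
  rw [pvRef]

-- the per-combination match computations of the two loops, named for the proofs
def pvMA (xs : List Int) (fs : List (List Int)) (k p : Int) (T : List Int) : List Bool :=
  let n := xs.length
  let ell := fs.length
  let xT := T.map (fun i => PySem.List.pyGetD xs i 0)
  let coeffsList := (PySem.List.pyRange 0 (ell : Int) 1).foldl (fun cl j =>
    let yT := T.map (fun i => PySem.List.pyGetD (PySem.List.pyGetD fs j []) i 0)
    cl ++ [pvInterpolateLagrange xT yT k p]) []
  (PySem.List.pyRange 0 (ell : Int) 1).foldl (fun mtch j =>
    let cw := pvEvalPolyVector (PySem.List.pyGetD coeffsList j []) xs p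
    (PySem.List.pyRange 0 (n : Int) 1).foldl (fun mtch i =>
      if PySem.List.pyGetD mtch i false ∧
          PySem.List.pyGetD cw i 0 ≠ PySem.List.pyGetD (PySem.List.pyGetD fs j []) i 0 then
        PySem.List.pySetD mtch i false
      else mtch) mtch) (List.replicate n true)

def pvMB (xs : List Int) (fs : List (List Int)) (k p : Int) (T : List Int) : List Bool :=
  let n := xs.length
  let ell := fs.length
  let xT := T.map (fun i => PySem.List.pyGetD xs i 0)
  (PySem.List.pyRange 0 (ell : Int) 1).foldl (fun mtch j =>
    let f := PySem.List.pyGetD fs j []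
    let yT := T.map (fun i => PySem.List.pyGetD f i 0)
    (PySem.List.pyRange 0 (n : Int) 1).foldl (fun mtch i =>
      if PySem.List.pyGetD mtch i false ∧
          pvLagrangeEval xT yT (PySem.List.pyGetD xs i 0) k p ≠ PySem.List.pyGetD f i 0 then
        PySem.List.pySetD mtch i false
      else mtch) mtch) (List.replicate n true)

def pvGenLoop (xs : List Int) (M : List Int → List Bool) :
    List (List Int) → Int × Option (List Int) → Int × Option (List Int)
  | [], acc => acc
  | T :: rest, acc =>
    let n := xs.length
    let mtch := M T
    let S := (PySem.List.pyRange 0 (n : Int) 1).filter (fun i => PySem.List.pyGetD mtch i false)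
    if (S.length : Int) > acc.1 then
      if (S.length : Int) = (n : Int) then ((S.length : Int), some S)
      else pvGenLoop xs M rest ((S.length : Int), some S)
    else pvGenLoop xs M rest acc

theorem loopA_eq_gen (xs : List Int) (fs : List (List Int)) (k p : Int) :
    ∀ (l : List (List Int)) (acc : Int × Option (List Int)),
      pvLoopA xs fs k p l acc = pvGenLoop xs (pvMA xs fs k p) l acc := by
  intro l
  induction l with
  | nil => intro acc; rfl
  | cons T rest ih =>
    intro acc
    simp only [pvLoopA, pvGenLoop, pvMA, ih]

theorem loopB_eq_gen (xs : List Int) (fs : List (List Int)) (k p : Int) :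
    ∀ (l : List (List Int)) (acc : Int × Option (List Int)),
      pvLoopB xs fs k p l acc = pvGenLoop xs (pvMB xs fs k p) l acc := by
  intro l
  induction l with
  | nil => intro acc; rfl
  | cons T rest ih =>
    intro acc
    simp only [pvLoopB, pvGenLoop, pvMB, ih]

theorem mtch_fold_eq (ell n : Int) (g h q : Int → Int → Int) (init : List Bool)
    (hgh : ∀ j i, 0 ≤ j → j < ell → 0 ≤ i → i < n → g j i = h j i) :
    (PySem.List.pyRange 0 ell 1).foldl (fun mtch j =>
      (PySem.List.pyRange 0 n 1).foldl (fun mtch i =>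
        if PySem.List.pyGetD mtch i false ∧ g j i ≠ q j i then PySem.List.pySetD mtch i false
        else mtch) mtch) init =
    (PySem.List.pyRange 0 ell 1).foldl (fun mtch j =>
      (PySem.List.pyRange 0 n 1).foldl (fun mtch i =>
        if PySem.List.pyGetD mtch i false ∧ h j i ≠ q j i then PySem.List.pySetD mtch i false
        else mtch) mtch) init := by
  refine PySem.List.foldl_congr_mem _ _ _ _ ?_
  intro acc j hj
  obtain ⟨hj0, hjl⟩ := PySem.List.mem_pyRange_one.mp hj
  refine PySem.List.foldl_congr_mem _ _ _ _ ?_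
  intro acc2 i hi
  obtain ⟨hi0, hil⟩ := PySem.List.mem_pyRange_one.mp hi
  rw [hgh j i hj0 hjl hi0 hil]

theorem MA_eq_MB (xs : List Int) (fs : List (List Int)) (k p : Int)
    (hp : 0 < p) (hk : 0 ≤ k) (T : List Int) :
    pvMA xs fs k p T = pvMB xs fs k p T := by
  simp only [pvMA, pvMB]
  refine mtch_fold_eq (fs.length : Int) (xs.length : Int)
    (fun j i => PySem.List.pyGetD (pvEvalPolyVector (PySem.List.pyGetD
      ((PySem.List.pyRange 0 (fs.length : Int) 1).foldl (fun cl j =>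
        cl ++ [pvInterpolateLagrange (T.map (fun i => PySem.List.pyGetD xs i 0))
          (T.map (fun i => PySem.List.pyGetD (PySem.List.pyGetD fs j []) i 0)) k p]) []) j []) xs p) i 0)
    (fun j i => pvLagrangeEval (T.map (fun i => PySem.List.pyGetD xs i 0))
      (T.map (fun i => PySem.List.pyGetD (PySem.List.pyGetD fs j []) i 0))
      (PySem.List.pyGetD xs i 0) k p)
    (fun j i => PySem.List.pyGetD (PySem.List.pyGetD fs j []) i 0)
    (List.replicate xs.length true) ?_
  intro j i hj0 hjl hi0 hil
  beta_reduce
  rw [PySem.List.foldl_append_singleton_eq_map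
    (f := fun j => pvInterpolateLagrange (T.map (fun i => PySem.List.pyGetD xs i 0))
      (T.map (fun i => PySem.List.pyGetD (PySem.List.pyGetD fs j []) i 0)) k p),
    List.nil_append,
    PySem.List.pyGetD_map_pyRange_of_nonneg _ _ _ _ hj0 hjl]
  show PySem.List.pyGetD (List.map (fun x => pvPolyEval _ x p) xs) i 0 = _
  rw [PySem.List.pyGetD_eq_getElem _ _ hi0 (by simpa using hil),
    List.getElem_map,
    PySem.List.pyGetD_eq_getElem _ _ hi0 (by simpa using hil),
    interp_eval _ _ _ _ _ hp hk, lagrangeEval_eq _ _ _ _ _ hp hk]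

theorem loopA_eq_loopB (xs : List Int) (fs : List (List Int)) (k p : Int)
    (hp : 0 < p) (hk : 0 ≤ k) :
    ∀ (l : List (List Int)) (acc : Int × Option (List Int)),
      pvLoopA xs fs k p l acc = pvLoopB xs fs k p l acc := by
  intro l acc
  rw [loopA_eq_gen, loopB_eq_gen,
    funext (MA_eq_MB xs fs k p hp hk)]

-- ===== VERDICT (by name: the statement is the Claim_ definition above) =====
theorem mutual_agreement_max_witness_spec : Claim_equal_mutual_agreement_max_witness := by
  intro xs fs k p _hdom hpre
  obtain ⟨hp, hk, -, -⟩ := hpre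
  unfold Spec_mutual_agreement_max_witness
  unfold mutual_agreement_max_witness mutual_agreement_max_witness_alt
  simp only [loopA_eq_loopB xs fs k p (by omega) hk]
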